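-- pv_equiv track=rewrite | github.com/pm012/Learning | module7_own_packages/m7task11.py | sequence_buttons
-- ===== SOURCE A (Python) =====
-- def repeat(k:str, n:int)->str:
--     n=n+1
--     rpt_str =""
--     if n==1:
--         return k
--     elif n>1:
--         for _ in range(n):
--             rpt_str += k
--         return rpt_str
--
-- def sequence_buttons(string):
--     res=""
--     char_dict = {
--         '1': ['.', ',', '?', '!', ':'],
--         '2': ['A', 'B', 'C'],
--         '3': ['D', 'E', 'F'],
--         '4': ['G', 'H', 'I'],
--         '5': ['J', 'K', 'L'],
--         '6': ['M', 'N', 'O'],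
--         '7': ['P', 'Q', 'R', 'S'],
--         '8': ['T', 'U', 'V'],
--         '9': ['W', 'X', 'Y', 'Z'],
--         '0': [' ']
--         }
--     for ch in string:
--         for k,v in char_dict.items():
--             if ch.isalpha() and ch.upper() in v:
--                 res+=repeat(k,v.index(ch.upper()))
--             elif not ch.isalpha() and ch in v:
--                 res+=repeat(k,v.index(ch))
--             else:
--                 continue
--
--     return res
-- ===== SOURCE B (Python) =====
-- def sequence_buttons(string):
--     # Closed-form keypad arithmetic: no dict, no scanning.
--     def encode(ch):
--         if ch.isalpha():
--             i = ord(ch.upper()) - ord('A')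
--             if i < 15:                      # A..O: rows of 3
--                 return chr(ord('2') + i // 3) * (i % 3 + 1)
--             if i < 19:                      # P,Q,R,S
--                 return '7' * (i - 14)
--             if i < 22:                      # T,U,V
--                 return '8' * (i - 18)
--             return '9' * (i - 21)           # W,X,Y,Z
--         j = '.,?!:'.find(ch)
--         if j >= 0:
--             return '1' * (j + 1)
--         if ch == ' ':
--             return '0'
--         return ''
--     return ''.join(encode(ch) for ch in string)
-- ===== Notes on version B (the rewrite author's own statement) =====
-- stated objective: alternative
-- what changed: B drops the keypad dict entirely: each letter's digit and press count are computed by closed-form arithmetic on its character code (rows of three plus the PQRS/TUV/WXYZ corrections), each punctuation mark by one find into the five-symbol row string, and the pieces are joined, instead of A's per-character scan over all dict rows with list.index and a repeat loop.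
import Mathlib
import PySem

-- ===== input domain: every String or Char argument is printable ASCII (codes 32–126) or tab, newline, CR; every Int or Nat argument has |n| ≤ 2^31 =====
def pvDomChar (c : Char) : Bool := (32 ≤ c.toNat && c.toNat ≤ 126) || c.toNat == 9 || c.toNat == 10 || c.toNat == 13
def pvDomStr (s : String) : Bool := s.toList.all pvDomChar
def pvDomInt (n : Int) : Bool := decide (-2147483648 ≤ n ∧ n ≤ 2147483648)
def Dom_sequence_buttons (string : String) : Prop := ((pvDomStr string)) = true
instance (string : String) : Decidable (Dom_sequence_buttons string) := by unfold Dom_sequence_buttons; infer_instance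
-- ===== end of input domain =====

-- B drops A's keypad dict and per-character row scan: each letter's digit and press count come
-- from closed-form arithmetic on its character code, punctuation from one find into ".,?!:".

-- ===== PORT A =====
-- the dict literal char_dict of A, as an insertion-ordered association list
def pvCharDictA : List (String × List Char) :=
  [("1", ['.', ',', '?', '!', ':']),
   ("2", ['A', 'B', 'C']),
   ("3", ['D', 'E', 'F']),
   ("4", ['G', 'H', 'I']),
   ("5", ['J', 'K', 'L']),
   ("6", ['M', 'N', 'O']),
   ("7", ['P', 'Q', 'R', 'S']),
   ("8", ['T', 'U', 'V']),
   ("9", ['W', 'X', 'Y', 'Z']),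
   ("0", [' '])]

-- A's helper repeat(k, n); the final 'else' arm returns "" where Python falls off returning None,
-- unreachable at A's call sites since n is a list index (≥ 0)
def pvRepeat (k : String) (n : Int) : String :=
  let n := n + 1
  if n == 1 then k
  else if n > 1 then (PySem.List.pyRange 0 n 1).foldl (fun rpt_str _ => rpt_str ++ k) ""
  else ""

def sequence_buttons (string : String) : String :=
  string.toList.foldl (fun res ch =>
    pvCharDictA.foldl (fun res kv =>
      if PySem.Chars.isalpha ch && kv.2.contains (PySem.Chars.upperChar ch) then
        res ++ pvRepeat kv.1 (((PySem.List.index? kv.2 (PySem.Chars.upperChar ch)).getD 0 : Nat) : Int)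
      else if !PySem.Chars.isalpha ch && kv.2.contains ch then
        res ++ pvRepeat kv.1 (((PySem.List.index? kv.2 ch).getD 0 : Nat) : Int)
      else res) res) ""

-- ===== PORT B =====
-- Python's string repetition s * m (empty for m ≤ 0)
def pvStrMul (s : String) (m : Int) : String := (List.replicate m.toNat s).foldl (· ++ ·) ""

-- Source B's helper encode(ch); chr(ord('2') + i // 3) is Char.ofNat — exact here since the
-- reachable codes are 50..56 (i is 0..14 on that branch for any ASCII letter)
def pvEncodeB (ch : Char) : String :=
  if PySem.Chars.isalpha ch then
    let i : Int := ((PySem.Chars.upperChar ch).toNat : Int) - 65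
    if i < 15 then pvStrMul (String.ofList [Char.ofNat (50 + PySem.Int.floordiv i 3).toNat]) (PySem.Int.mod i 3 + 1)
    else if i < 19 then pvStrMul "7" (i - 14)
    else if i < 22 then pvStrMul "8" (i - 18)
    else pvStrMul "9" (i - 21)
  else
    let j := PySem.Str.find ".,?!:" (String.ofList [ch])
    if j ≥ 0 then pvStrMul "1" (j + 1)
    else if ch = ' ' then "0"
    else ""

def sequence_buttons_alt (string : String) : String :=
  PySem.Str.join "" (string.toList.map pvEncodeB)

-- ===== PRECONDITION & SPEC =====
def Spec_sequence_buttons (string : String) (out : String) : Prop := out = sequence_buttons_alt string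
instance (string : String) (out : String) : Decidable (Spec_sequence_buttons string out) := by unfold Spec_sequence_buttons; infer_instance

-- ===== CLAIM (what is proved, stated in full; the proofs are below) =====
def Claim_equal_sequence_buttons : Prop := ∀ (string : String), Dom_sequence_buttons string → Spec_sequence_buttons string (sequence_buttons string)

-- ===== LEMMAS AND PROOFS =====

-- the lookup key A's row scan effectively uses for a character
def pvKey (ch : Char) : Char := if PySem.Chars.isalpha ch then PySem.Chars.upperChar ch else ch

-- what A's inner scan appends for one keypad row, given the lookup key
def pvEntry (key : Char) (kv : String × List Char) : String :=
  if kv.2.contains key then pvRepeat kv.1 (((PySem.List.index? kv.2 key).getD 0 : Nat) : Int) else ""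

-- what A's whole inner scan appends for one character
def pvRowVal (key : Char) : String := (pvCharDictA.map (pvEntry key)).foldl (· ++ ·) ""

theorem strfold (l : List String) : ∀ a : String, l.foldl (· ++ ·) a = a ++ l.foldl (· ++ ·) "" := by
  induction l with
  | nil => intro a; simp
  | cons x xs ih =>
    intro a
    simp only [List.foldl_cons]
    rw [ih (a ++ x), ih ("" ++ x)]
    simp [String.append_assoc]

theorem foldl_strapp {α : Type} (g : α → String) (l : List α) (res : String) :
    l.foldl (fun r x => r ++ g x) res = res ++ (l.map g).foldl (· ++ ·) "" := by
  induction l generalizing res with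
  | nil => simp
  | cons x xs ih =>
    simp only [List.foldl_cons, List.map_cons]
    rw [ih (res ++ g x), strfold ((xs.map g)) ("" ++ g x)]
    simp [String.append_assoc]

theorem step_eq_row (ch : Char) (res : String) :
    pvCharDictA.foldl (fun res kv =>
      if PySem.Chars.isalpha ch && kv.2.contains (PySem.Chars.upperChar ch) then
        res ++ pvRepeat kv.1 (((PySem.List.index? kv.2 (PySem.Chars.upperChar ch)).getD 0 : Nat) : Int)
      else if !PySem.Chars.isalpha ch && kv.2.contains ch then
        res ++ pvRepeat kv.1 (((PySem.List.index? kv.2 ch).getD 0 : Nat) : Int)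
      else res) res
    = res ++ pvRowVal (pvKey ch) := by
  have h1 : pvCharDictA.foldl (fun res kv =>
      if PySem.Chars.isalpha ch && kv.2.contains (PySem.Chars.upperChar ch) then
        res ++ pvRepeat kv.1 (((PySem.List.index? kv.2 (PySem.Chars.upperChar ch)).getD 0 : Nat) : Int)
      else if !PySem.Chars.isalpha ch && kv.2.contains ch then
        res ++ pvRepeat kv.1 (((PySem.List.index? kv.2 ch).getD 0 : Nat) : Int)
      else res) res
    = pvCharDictA.foldl (fun res kv => res ++ pvEntry (pvKey ch) kv) res := by
    apply PySem.List.foldl_congr_mem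
    intro acc kv _
    unfold pvKey
    cases PySem.Chars.isalpha ch
    · simp only [Bool.false_and, Bool.not_false, Bool.true_and, if_false,
        Bool.false_eq_true, pvEntry]
      split <;> simp
    · simp only [Bool.true_and, Bool.not_true, Bool.false_and, if_true,
        Bool.false_eq_true, pvEntry]
      split <;> simp
  rw [h1, foldl_strapp]
  rfl

theorem intersperse_nil_flatten {α : Type} : ∀ ls : List (List α), (List.intersperse [] ls).flatten = ls.flatten
  | [] => rfl
  | [x] => by simp
  | x :: y :: ys => by
    have h : List.intersperse ([] : List α) (x :: y :: ys) = x :: [] :: List.intersperse [] (y :: ys) := rfl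
    rw [h]
    simp only [List.flatten_cons, List.nil_append, intersperse_nil_flatten (y :: ys)]

theorem join_empty_cons (x : String) (xs : List String) :
    PySem.Str.join "" (x :: xs) = x ++ PySem.Str.join "" xs := by
  have he : ("" : String).toList = [] := rfl
  simp only [PySem.Str.join, PySem.Chars.join, List.intercalate, List.map_cons, he]
  rw [intersperse_nil_flatten, intersperse_nil_flatten, List.flatten_cons,
    String.ofList_append, String.ofList_toList]

set_option maxRecDepth 8000 in
set_option maxHeartbeats 4000000 in
theorem rowVal_eq_encode_lt (n : Nat) (hn : n < 128) (hd : pvDomChar (Char.ofNat n) = true) :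
    pvRowVal (pvKey (Char.ofNat n)) = pvEncodeB (Char.ofNat n) := by
  revert hd
  revert n
  decide

theorem rowVal_eq_encode (c : Char) (hd : pvDomChar c = true) :
    pvRowVal (pvKey c) = pvEncodeB c := by
  have hlt : c.toNat < 128 := by
    simp only [pvDomChar, Bool.or_eq_true, Bool.and_eq_true, decide_eq_true_eq, beq_iff_eq] at hd
    omega
  have := rowVal_eq_encode_lt c.toNat hlt (by rw [Char.ofNat_toNat]; exact hd)
  rwa [Char.ofNat_toNat] at this

theorem main_fold (cs : List Char) : ∀ res : String, (∀ c ∈ cs, pvDomChar c = true) →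
    cs.foldl (fun res ch =>
      pvCharDictA.foldl (fun res kv =>
        if PySem.Chars.isalpha ch && kv.2.contains (PySem.Chars.upperChar ch) then
          res ++ pvRepeat kv.1 (((PySem.List.index? kv.2 (PySem.Chars.upperChar ch)).getD 0 : Nat) : Int)
        else if !PySem.Chars.isalpha ch && kv.2.contains ch then
          res ++ pvRepeat kv.1 (((PySem.List.index? kv.2 ch).getD 0 : Nat) : Int)
        else res) res) res
    = res ++ PySem.Str.join "" (cs.map pvEncodeB) := by
  induction cs with
  | nil => intro res _; simp [PySem.Str.join, PySem.Chars.join, List.intercalate]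
  | cons c cs ih =>
    intro res hdom
    simp only [List.foldl_cons, List.map_cons]
    rw [step_eq_row, ih _ (fun x hx => hdom x (List.mem_cons_of_mem c hx)),
      rowVal_eq_encode c (hdom c (List.mem_cons_self)), join_empty_cons,
      String.append_assoc]

-- ===== VERDICT (by name: the statement is the Claim_ definition above) =====
theorem sequence_buttons_spec : Claim_equal_sequence_buttons := by
  intro s hdom
  unfold Spec_sequence_buttons sequence_buttons sequence_buttons_alt
  have hd : ∀ c ∈ s.toList, pvDomChar c = true := by
    have := hdom
    unfold Dom_sequence_buttons pvDomStr at this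
    exact List.all_eq_true.mp this
  rw [main_fold s.toList "" hd]
  simp
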